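-- pv_equiv track=rewrite | github.com/hamtoy/Test | scripts/compare_runs.py | _extract_first_line_after
-- ===== SOURCE A (Python) =====
-- from typing import Iterable, List
--
-- def _extract_first_line_after(header: str, lines: List[str]) -> str | None:
--     for idx, line in enumerate(lines):
--         if line.strip().lower() == header.lower():
--             for candidate in lines[idx + 1 :]:
--                 stripped = candidate.strip()
--                 if stripped:
--                     return stripped
--     return None
-- ===== SOURCE B (Python) =====
-- def _extract_first_line_after(header, lines):
--     target = header.lower()
--     seen_header = False
--     for line in lines:
--         if seen_header:
--             stripped = line.strip()
--             if stripped: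
--                 return stripped
--         elif line.strip().lower() == target:
--             seen_header = True
--     return None
-- ===== Notes on version B (the rewrite author's own statement) =====
-- stated objective: faster
-- what changed: Replaced the nested loop over enumerate plus a lines[idx+1:] slice per header match with a single flat pass maintaining a seen_header boolean state.
import Mathlib
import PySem

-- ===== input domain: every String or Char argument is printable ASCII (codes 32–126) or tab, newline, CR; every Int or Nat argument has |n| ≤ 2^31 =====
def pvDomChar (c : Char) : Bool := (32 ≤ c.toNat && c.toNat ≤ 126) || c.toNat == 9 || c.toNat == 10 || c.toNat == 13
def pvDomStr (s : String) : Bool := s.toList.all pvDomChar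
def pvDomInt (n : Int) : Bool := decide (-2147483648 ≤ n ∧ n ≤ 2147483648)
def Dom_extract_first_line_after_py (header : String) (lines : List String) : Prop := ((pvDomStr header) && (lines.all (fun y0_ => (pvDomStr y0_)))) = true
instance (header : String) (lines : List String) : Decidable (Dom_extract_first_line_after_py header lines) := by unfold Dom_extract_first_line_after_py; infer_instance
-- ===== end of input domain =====

-- B replaces A's nested loop + lines[idx+1:] slice by one flat pass with a seen_header flag (objective: simpler).
-- ===== PORT A =====
-- inner 'for candidate in lines[idx+1:]' loop: first non-empty stripped line, else falls through (none)
def pvInnerA (rest : List String) : Option String :=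
  match rest with
  | [] => none
  | c :: t =>
    let stripped := PySem.Str.strip c
    if stripped ≠ "" then some stripped else pvInnerA t

-- outer 'for idx, line in enumerate(lines)' loop; the remaining list 'rest' is lines[idx:],
-- so lines[idx+1:] is exactly its tail t (exact: the slice from idx+1 of the full list)
def pvOuterA (hl : String) (rest : List String) : Option String :=
  match rest with
  | [] => none
  | line :: t =>
    if PySem.Str.lower (PySem.Str.strip line) == hl then
      match pvInnerA t with
      | some s => some s
      | none => pvOuterA hl t
    else pvOuterA hl t

def extract_first_line_after_py (header : String) (lines : List String) : Option String :=
  pvOuterA (PySem.Str.lower header) lines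

-- ===== PORT B =====
def pvFlatB (target : String) (seen : Bool) (rest : List String) : Option String :=
  match rest with
  | [] => none
  | line :: t =>
    if seen then
      let stripped := PySem.Str.strip line
      if stripped ≠ "" then some stripped else pvFlatB target true t
    else
      if PySem.Str.lower (PySem.Str.strip line) == target then pvFlatB target true t
      else pvFlatB target false t

def extract_first_line_after_py_alt (header : String) (lines : List String) : Option String :=
  pvFlatB (PySem.Str.lower header) false lines

-- ===== PRECONDITION & SPEC =====
def Spec_extract_first_line_after_py (header : String) (lines : List String) (out : Option String) : Prop := out = extract_first_line_after_py_alt header lines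
instance (header : String) (lines : List String) (out : Option String) : Decidable (Spec_extract_first_line_after_py header lines out) := by unfold Spec_extract_first_line_after_py; infer_instance

-- ===== CLAIM (what is proved, stated in full; the proofs are below) =====
def Claim_equal_extract_first_line_after_py : Prop := ∀ (header : String) (lines : List String), Dom_extract_first_line_after_py header lines → Spec_extract_first_line_after_py header lines (extract_first_line_after_py header lines)

-- ===== LEMMAS AND PROOFS =====

-- ===== VERDICT (by name: the statement is the Claim_ definition above) =====
-- the flat pass in 'seen' state is exactly A's inner loop
theorem pvFlatB_true (hl : String) (t : List String) : pvFlatB hl true t = pvInnerA t := by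
  induction t with
  | nil => rfl
  | cons c r ih => simp only [pvFlatB, pvInnerA, ih, if_true]

-- if the inner loop finds nothing, every further outer iteration finds nothing either
theorem pvOuterA_none (hl : String) (t : List String) (h : pvInnerA t = none) :
    pvOuterA hl t = none := by
  induction t with
  | nil => rfl
  | cons c r ih =>
    simp only [pvInnerA] at h
    split at h
    · exact absurd h (by simp)
    · simp only [pvOuterA]
      split <;> simp_all

theorem pvOuterA_eq_flat (hl : String) (t : List String) :
    pvOuterA hl t = pvFlatB hl false t := by
  induction t with
  | nil => rfl
  | cons c r ih =>
    simp only [pvOuterA, pvFlatB]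
    split
    · rw [pvFlatB_true]
      cases h : pvInnerA r with
      | some s => rfl
      | none => simpa [h] using pvOuterA_none hl r h
    · exact ih

theorem extract_first_line_after_py_spec : Claim_equal_extract_first_line_after_py := by
  intro header lines _
  unfold Spec_extract_first_line_after_py extract_first_line_after_py extract_first_line_after_py_alt
  exact pvOuterA_eq_flat _ _
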